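-- pv_equiv track=rewrite | github.com/BrandonJew/Sequence_Aligner | viterbi.py | getbest
-- ===== SOURCE A (Python) =====
-- def getbest(poss, s = 0):
--     t = {}
--     for p in poss:
--         t[p[1]] = p[0]
--     maximum = max(t.values())
--     states = []
--     for state in t.keys():
--         if t[state] == maximum:
--             states.append(state)
--     return [maximum + s, sorted(states)[-1]]
-- ===== SOURCE B (Python) =====
-- def getbest(poss, s = 0):
--     t = {}
--     for p in poss:
--         t[p[1]] = p[0]
--     best_state, best_val = max(t.items(), key=lambda kv: (kv[1], kv[0]))
--     return [best_val + s, best_state]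
-- ===== Notes on version B (the rewrite author's own statement) =====
-- stated objective: simpler
-- what changed: Replaces A's three-step selection (max over values, a second loop collecting tying states, sorting the ties and taking the last) by a single lexicographic argmax over the dict items with key (value, state).
import Mathlib
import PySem

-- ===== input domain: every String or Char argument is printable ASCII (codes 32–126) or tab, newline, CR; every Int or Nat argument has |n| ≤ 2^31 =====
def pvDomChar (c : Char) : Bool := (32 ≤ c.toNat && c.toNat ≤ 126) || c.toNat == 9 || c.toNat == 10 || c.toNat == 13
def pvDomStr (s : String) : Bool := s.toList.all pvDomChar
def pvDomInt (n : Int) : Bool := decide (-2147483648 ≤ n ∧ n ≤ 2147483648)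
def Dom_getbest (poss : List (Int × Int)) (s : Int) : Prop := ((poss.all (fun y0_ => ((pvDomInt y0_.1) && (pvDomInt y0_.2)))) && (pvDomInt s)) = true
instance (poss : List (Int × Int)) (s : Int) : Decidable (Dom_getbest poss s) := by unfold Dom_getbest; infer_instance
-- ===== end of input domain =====

-- B replaces A's three-step tie-breaking selection (max of values, collect tying states, sort and take last)
-- by a single lexicographic argmax over the dict items with key (value, state); objective: simpler.

-- ===== PORT A =====
def getbest (poss : List (Int × Int)) (s : Int) : List Int :=
  let t : PySem.Dict Int Int := poss.foldl (fun d p => d.insert p.2 p.1) PySem.Dict.empty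
  match PySem.List.max? t.values (fun v => v) with
  | none => []          -- max() of empty: Python raises ValueError; excluded by Pre_getbest
  | some maximum =>
    -- t[state] is always present here (state ranges over t's keys), so getD is exact
    let states : List Int :=
      t.keys.foldl (fun acc state => if t.getD state 0 == maximum then acc ++ [state] else acc) []
    match PySem.List.pyGet? (PySem.List.sorted states (fun x => x) false) (-1) with
    | none => []        -- unreachable: states is nonempty whenever maximum exists
    | some st => [maximum + s, st]

-- ===== PORT B =====
def getbest_alt (poss : List (Int × Int)) (s : Int) : List Int :=
  let t : PySem.Dict Int Int := poss.foldl (fun d p => d.insert p.2 p.1) PySem.Dict.empty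
  match PySem.List.max2? t.items (fun kv => kv.2) (fun kv => kv.1) with
  | none => []          -- max() of empty: Python raises ValueError; excluded by Pre_getbest
  | some kv => [kv.2 + s, kv.1]

-- ===== PRECONDITION & SPEC =====
-- Pre_ excludes only the empty list, on which A (and B) raise ValueError from max() of an empty sequence.
def Pre_getbest (poss : List (Int × Int)) (s : Int) : Prop := poss ≠ []
instance (poss : List (Int × Int)) (s : Int) : Decidable (Pre_getbest poss s) := by unfold Pre_getbest; infer_instance
def pvWitness_getbest : (List (Int × Int)) × Int := ([(3, 1), (3, 2), (1, 5)], 10)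

def Spec_getbest (poss : List (Int × Int)) (s : Int) (out : List Int) : Prop := out = getbest_alt poss s
instance (poss : List (Int × Int)) (s : Int) (out : List Int) : Decidable (Spec_getbest poss s out) := by unfold Spec_getbest; infer_instance

-- ===== CLAIM (what is proved, stated in full; the proofs are below) =====
def Claim_equal_getbest : Prop := ∀ (poss : List (Int × Int)) (s : Int), Dom_getbest poss s → Pre_getbest poss s → Spec_getbest poss s (getbest poss s)

-- ===== LEMMAS AND PROOFS =====

-- "at least as large as" in the lexicographic order on (state, value) pairs compared by (value, state)
def pvLexGe (a b : Int × Int) : Prop := b.2 < a.2 ∨ (b.2 = a.2 ∧ b.1 ≤ a.1)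

theorem pvLexGe_trans {a b c : Int × Int} (h1 : pvLexGe a b) (h2 : pvLexGe b c) : pvLexGe a c := by
  unfold pvLexGe at *; omega

-- one step of max2?'s fold, merged into the head of the remaining list
theorem pvMax2_cons_cons (y z : Int × Int) (tl : List (Int × Int)) :
    PySem.List.max2? (y :: z :: tl) (fun kv => kv.2) (fun kv => kv.1)
      = PySem.List.max2? ((if y.2 < z.2 ∨ (y.2 ≤ z.2 ∧ y.1 < z.1) then z else y) :: tl)
          (fun kv => kv.2) (fun kv => kv.1) := by
  simp [PySem.List.max2?]
  rw [← apply_ite some]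

theorem pvMax2_cons_inv (tl : List (Int × Int)) : ∀ (y m : Int × Int),
    PySem.List.max2? (y :: tl) (fun kv => kv.2) (fun kv => kv.1) = some m →
    (m = y ∨ m ∈ tl) ∧ pvLexGe m y ∧ ∀ x ∈ tl, pvLexGe m x := by
  induction tl with
  | nil =>
    intro y m h
    simp [PySem.List.max2?] at h
    subst h
    exact ⟨Or.inl rfl, by unfold pvLexGe; omega, by simp⟩
  | cons z tl ih =>
    intro y m h
    rw [pvMax2_cons_cons] at h
    obtain ⟨hmem, hge, hall⟩ := ih _ m h
    by_cases hc : y.2 < z.2 ∨ (y.2 ≤ z.2 ∧ y.1 < z.1)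
    · rw [if_pos hc] at hmem hge
      have hzy : pvLexGe z y := by unfold pvLexGe; omega
      refine ⟨?_, pvLexGe_trans hge hzy, ?_⟩
      · rcases hmem with rfl | h1
        · exact Or.inr (by simp)
        · exact Or.inr (List.mem_cons_of_mem _ h1)
      · intro x hx
        rcases List.mem_cons.mp hx with rfl | hx
        · exact hge
        · exact hall x hx
    · rw [if_neg hc] at hmem hge
      have hyz : pvLexGe y z := by unfold pvLexGe; omega
      refine ⟨?_, hge, ?_⟩
      · rcases hmem with rfl | h1
        · exact Or.inl rfl
        · exact Or.inr (List.mem_cons_of_mem _ h1)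
      · intro x hx
        rcases List.mem_cons.mp hx with rfl | hx
        · exact pvLexGe_trans hge hyz
        · exact hall x hx

-- max2? with key (value, state) returns a member that is lexicographically ≥ every member
theorem pvMax2_spec {L : List (Int × Int)} {m : Int × Int}
    (h : PySem.List.max2? L (fun kv => kv.2) (fun kv => kv.1) = some m) :
    m ∈ L ∧ ∀ x ∈ L, pvLexGe m x := by
  cases L with
  | nil => simp [PySem.List.max2?] at h
  | cons y tl =>
    obtain ⟨hmem, hge, hall⟩ := pvMax2_cons_inv tl y m h
    refine ⟨?_, ?_⟩
    · rcases hmem with rfl | h1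
      · exact List.mem_cons_self
      · exact List.mem_cons_of_mem _ h1
    · intro x hx
      rcases List.mem_cons.mp hx with rfl | hx
      · exact hge
      · exact hall x hx

theorem pvMax2_isSome (tl : List (Int × Int)) : ∀ (y : Int × Int),
    ∃ m, PySem.List.max2? (y :: tl) (fun kv => kv.2) (fun kv => kv.1) = some m := by
  induction tl with
  | nil => intro y; exact ⟨y, by simp [PySem.List.max2?]⟩
  | cons z tl ih =>
    intro y
    rw [pvMax2_cons_cons]
    exact ih _

-- lookup in a dict with Nodup keys returns the paired value
theorem pvGetD_of_mem {t : PySem.Dict Int Int} {kv : Int × Int}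
    (hnd : t.keys.Nodup) (hm : kv ∈ t.items) : t.getD kv.1 0 = kv.2 := by
  obtain ⟨L⟩ := t
  simp only [PySem.Dict.keys] at hnd
  simp only [PySem.Dict.getD, PySem.Dict.get?] at *
  induction L with
  | nil => simp at hm
  | cons y tl ih =>
    simp only [List.map_cons, List.nodup_cons] at hnd
    rcases List.mem_cons.mp hm with rfl | hmem
    · simp
    · have hne : (y.1 == kv.1) = false := by
        simp only [beq_eq_false_iff_ne, ne_eq]
        intro he
        exact hnd.1 (he ▸ List.mem_map_of_mem hmem)
      simp only [List.find?_cons, hne]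
      exact ih hnd.2 hmem

-- pyGet? xs (-1) on a nonempty list is the last element
theorem pvPyGet_neg_one {α : Type} (xs : List α) (h : xs ≠ []) :
    PySem.List.pyGet? xs (-1) = some (xs[xs.length - 1]'(by
      have := List.length_pos_iff.mpr h; omega)) := by
  have hl : 0 < xs.length := List.length_pos_iff.mpr h
  simp only [PySem.List.pyGet?, PySem.List.pyIdx?]
  have h1 : ¬ (0 : Int) ≤ -1 := by omega
  have h2 : -(xs.length : Int) ≤ -1 := by omega
  simp only [h1, if_false, h2, if_pos]
  have : xs.length - (-(-1 : Int)).toNat = xs.length - 1 := by omega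
  rw [this]
  simp [Option.bind, List.getElem?_eq_getElem (by omega : xs.length - 1 < xs.length)]

-- sorted(zs)[-1] is a maximum of zs
theorem pvSortedLast_spec {zs : List Int} {u : Int}
    (h : PySem.List.pyGet? (PySem.List.sorted zs (fun x => x) false) (-1) = some u) :
    u ∈ zs ∧ ∀ y ∈ zs, y ≤ u := by
  by_cases hz : zs = []
  · subst hz; simp [PySem.List.sorted, PySem.List.pyGet?, PySem.List.pyIdx?] at h
  · have hs : PySem.List.sorted zs (fun x => x) false ≠ [] := by
      intro he
      exact hz (by simpa [PySem.List.sorted_eq_nil_iff] using he)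
    rw [pvPyGet_neg_one _ hs] at h
    have hlen : 0 < (PySem.List.sorted zs (fun x => x) false).length :=
      List.length_pos_iff.mpr hs
    injection h with h
    constructor
    · rw [← h]
      exact (PySem.List.mem_sorted zs _ false _).mp (List.getElem_mem _)
    · intro y hy
      have hy' : y ∈ PySem.List.sorted zs (fun x => x) false :=
        (PySem.List.mem_sorted zs _ false _).mpr hy
      obtain ⟨p, hp, hpe⟩ := List.mem_iff_getElem.mp hy'
      rw [← h, ← hpe]
      exact PySem.List.key_sorted_getElem_mono zs (fun x => x) (by omega) (by omega)

theorem pvSortedLast_isSome {zs : List Int} (h : zs ≠ []) :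
    ∃ u, PySem.List.pyGet? (PySem.List.sorted zs (fun x => x) false) (-1) = some u := by
  have hs : PySem.List.sorted zs (fun x => x) false ≠ [] := by
    intro he
    exact h (by simpa [PySem.List.sorted_eq_nil_iff] using he)
  exact ⟨_, pvPyGet_neg_one _ hs⟩

-- ===== VERDICT (by name: the statement is the Claim_ definition above) =====
theorem getbest_spec : Claim_equal_getbest := by
  intro poss s _ hpre
  unfold Spec_getbest getbest getbest_alt
  set t : PySem.Dict Int Int := poss.foldl (fun d p => d.insert p.2 p.1) PySem.Dict.empty with ht
  -- the dict's keys are distinct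
  have hnd : t.keys.Nodup := by
    rw [ht]
    exact PySem.Dict.nodup_keys_foldl_insert_key poss (fun p => p.2) (fun d p => p.1)
      PySem.Dict.empty List.nodup_nil
  -- the dict is nonempty
  have hitems : t.items ≠ [] := by
    cases hp : poss with
    | nil => exact absurd hp hpre
    | cons p rest =>
      intro he
      have hk : t.keys = [] := by simp [PySem.Dict.keys, he]
      have : p.2 ∈ t.keys := by
        rw [ht, PySem.Dict.keys_foldl_insert_key poss (fun p => p.2) (fun d p => p.1)]
        have hek : PySem.Dict.empty.keys (κ := Int) (ν := Int) = ([] : List Int) := rfl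
        rw [hek, PySem.Set.update_nil_left, PySem.Set.mem_ofList]
        exact List.mem_map_of_mem (by rw [hp]; exact List.mem_cons_self)
      rw [hk] at this
      exact absurd this (List.not_mem_nil)
  -- A's maximum exists
  cases hmax : PySem.List.max? t.values (fun v => v) with
  | none =>
    rw [PySem.List.max?_eq_none_iff] at hmax
    exact absurd (by simpa [PySem.Dict.values] using hmax) hitems
  | some M =>
  have hMmem : M ∈ t.values := PySem.List.max?_mem hmax
  have hMmax : ∀ v ∈ t.values, v ≤ M := PySem.List.max?_isMax hmax
  -- B's argmax exists
  obtain ⟨m, hm⟩ : ∃ m, PySem.List.max2? t.items (fun kv => kv.2) (fun kv => kv.1) = some m := by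
    cases hL : t.items with
    | nil => exact absurd hL hitems
    | cons y tl => exact pvMax2_isSome tl y
  obtain ⟨hm_mem, hm_all⟩ := pvMax2_spec hm
  -- B's value component equals A's maximum
  have hm2 : m.2 = M := by
    have hle : m.2 ≤ M := hMmax m.2 (by
      simp only [PySem.Dict.values]; exact List.mem_map_of_mem hm_mem)
    obtain ⟨kv, hkv_mem, hkv2⟩ := List.mem_map.mp hMmem
    have := hm_all kv hkv_mem
    unfold pvLexGe at this
    omega
  -- A's states list is the filtered key list
  set states := t.keys.filter (fun state => t.getD state 0 == M) with hst
  have hfold : t.keys.foldl (fun acc state => if t.getD state 0 == M then acc ++ [state] else acc) [] = states := by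
    rw [PySem.List.foldl_append_if_eq_filter (fun state => t.getD state 0 == M) t.keys []]
    rw [List.nil_append, hst]
  -- m.1 belongs to states
  have hm1_mem : m.1 ∈ states := by
    rw [hst, List.mem_filter]
    refine ⟨List.mem_map_of_mem hm_mem, ?_⟩
    rw [pvGetD_of_mem hnd hm_mem, hm2]
    exact beq_self_eq_true M
  -- every member of states is ≤ m.1
  have hm1_max : ∀ u ∈ states, u ≤ m.1 := by
    intro u hu
    rw [hst, List.mem_filter] at hu
    obtain ⟨kv', hkv'_mem, hkv'1⟩ := List.mem_map.mp hu.1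
    have hval : kv'.2 = M := by
      have hgd := pvGetD_of_mem hnd hkv'_mem
      rw [hkv'1] at hgd
      rw [← hgd]
      exact eq_of_beq hu.2
    have := hm_all kv' hkv'_mem
    unfold pvLexGe at this
    omega
  have hne : states ≠ [] := by
    intro he; rw [he] at hm1_mem; exact absurd hm1_mem (List.not_mem_nil)
  obtain ⟨u, hu⟩ := pvSortedLast_isSome hne
  obtain ⟨hu_mem, hu_max⟩ := pvSortedLast_spec hu
  have huv : u = m.1 := le_antisymm (hm1_max u hu_mem) (hu_max m.1 hm1_mem)
  simp only [hmax, hm, hfold, hu, huv, hm2]
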